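-- pv_equiv track=rewrite | github.com/fallen-lord/grabber_mangalib | async_worker.py | filtering_to_unique
-- ===== SOURCE A (Python) =====
-- def filtering_to_unique(resluts: list):
--     # Create a dictionary to store tuples based on the first item
--     unique_tuples_dict = {}
--
--     for idx, val in resluts:
--         if idx not in unique_tuples_dict:
--             unique_tuples_dict[idx] = (idx, val)
--         elif val is not None:
--             unique_tuples_dict[idx] = (idx, val)
--
--     # Convert the dictionary values back to a list
--     unique_tuples = list(unique_tuples_dict.values())
--     unique_list = [t[1] for t in unique_tuples]
--     return unique_list
-- ===== SOURCE B (Python) =====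
-- def filtering_to_unique(resluts: list):
--     # Collect-then-reduce: group all values by idx, then pick per group.
--     groups = {}
--     for idx, val in resluts:
--         groups.setdefault(idx, []).append(val)
--     unique_list = []
--     for vals in groups.values():
--         chosen = None
--         for v in vals:
--             if v is not None:
--                 chosen = v
--         unique_list.append(chosen)
--     return unique_list
-- ===== Notes on version B (the rewrite author's own statement) =====
-- stated objective: alternative
-- what changed: Replaces A's incremental store-first-then-overwrite-on-non-None dict of tuples by a two-phase collect-then-reduce: first group all values per idx in first-appearance order, then select each group's last non-None value (None if all are None).
import Mathlib
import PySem

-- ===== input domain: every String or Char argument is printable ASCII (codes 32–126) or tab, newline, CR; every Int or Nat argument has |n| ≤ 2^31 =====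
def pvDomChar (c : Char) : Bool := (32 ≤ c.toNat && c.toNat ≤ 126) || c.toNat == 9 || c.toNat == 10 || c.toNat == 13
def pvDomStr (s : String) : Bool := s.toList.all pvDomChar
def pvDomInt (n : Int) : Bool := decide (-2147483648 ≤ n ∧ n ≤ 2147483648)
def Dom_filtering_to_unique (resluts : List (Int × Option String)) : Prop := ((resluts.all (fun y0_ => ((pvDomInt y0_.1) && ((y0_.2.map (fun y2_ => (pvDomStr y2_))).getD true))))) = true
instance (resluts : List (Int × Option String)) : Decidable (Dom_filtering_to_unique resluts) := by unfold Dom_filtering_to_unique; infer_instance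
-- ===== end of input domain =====

-- B replaces A's incremental store-then-overwrite accumulation by a collect-then-reduce
-- (group values per idx, then pick each group's last non-None value); same cost, different decomposition.


-- ===== PORT A =====
-- the body of A's for-loop: store on first sight, overwrite when the new value is not None
def pvStepA (d : PySem.Dict Int (Int × Option String)) (p : Int × Option String) :
    PySem.Dict Int (Int × Option String) :=
  if d.contains p.1 = false then d.insert p.1 (p.1, p.2)
  else if p.2.isSome then d.insert p.1 (p.1, p.2)
  else d

def filtering_to_unique (resluts : List (Int × Option String)) : List (Option String) :=
  let unique_tuples_dict := resluts.foldl pvStepA PySem.Dict.empty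
  let unique_tuples := unique_tuples_dict.values
  unique_tuples.map (fun t => t.2)

-- ===== PORT B =====
-- 'chosen = None; for v in vals: if v is not None: chosen = v'
def pvChooseLast (vals : List (Option String)) : Option String :=
  vals.foldl (fun chosen v => if v.isSome then v else chosen) none

def filtering_to_unique_alt (resluts : List (Int × Option String)) : List (Option String) :=
  let groups := resluts.foldl (fun d p => d.modify p.1 [] (· ++ [p.2])) PySem.Dict.empty
  groups.values.map (fun vals => pvChooseLast vals)

-- ===== PRECONDITION & SPEC =====
def Spec_filtering_to_unique (resluts : List (Int × Option String)) (out : List (Option String)) : Prop := out = filtering_to_unique_alt resluts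
instance (resluts : List (Int × Option String)) (out : List (Option String)) : Decidable (Spec_filtering_to_unique resluts out) := by unfold Spec_filtering_to_unique; infer_instance

-- ===== CLAIM (what is proved, stated in full; the proofs are below) =====
def Claim_equal_filtering_to_unique : Prop := ∀ (resluts : List (Int × Option String)), Dom_filtering_to_unique resluts → Spec_filtering_to_unique resluts (filtering_to_unique resluts)

-- ===== LEMMAS AND PROOFS =====

-- all values attached to key k, in input order
def pvValsOf (k : Int) (l : List (Int × Option String)) : List (Option String) :=
  (l.filter (fun p => p.1 == k)).map (fun p => p.2)

def pvChooseFrom (w : Option String) (vs : List (Option String)) : Option String :=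
  vs.foldl (fun chosen v => if v.isSome then v else chosen) w

theorem pvValsOf_cons (k : Int) (p : Int × Option String) (l : List (Int × Option String)) :
    pvValsOf k (p :: l) = if p.1 = k then p.2 :: pvValsOf k l else pvValsOf k l := by
  simp [pvValsOf, List.filter_cons]
  split_ifs <;> simp_all

theorem pvChooseLast_cons (v : Option String) (vs : List (Option String)) :
    pvChooseLast (v :: vs) = pvChooseFrom v vs := by
  cases v <;> simp [pvChooseLast, pvChooseFrom]

-- A's dict keys, in first-appearance order
theorem pvKeysA (l : List (Int × Option String)) (d : PySem.Dict Int (Int × Option String)) :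
    (l.foldl pvStepA d).keys = PySem.Set.update d.keys (l.map (·.1)) := by
  induction l generalizing d with
  | nil => simp [PySem.Set.update_nil]
  | cons p l ih =>
    rw [List.foldl_cons, ih, List.map_cons, PySem.Set.update_cons]
    congr 1
    unfold pvStepA
    by_cases hc : d.contains p.1 = false
    · rw [if_pos hc, PySem.Dict.keys_insert_of_not_contains _ _ hc,
        PySem.Set.add_of_not_mem]
      intro hm
      rw [← PySem.Dict.contains_iff_mem_keys] at hm
      simp [hc] at hm
    · have hc' : d.contains p.1 = true := by simpa using hc
      have hmem : p.1 ∈ d.keys := (PySem.Dict.contains_iff_mem_keys d p.1).mp hc'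
      rw [if_neg hc, PySem.Set.add_of_mem hmem]
      split_ifs
      · exact PySem.Dict.keys_insert_of_contains _ _ hc'
      · rfl

-- what .2 of A's stored tuple at key k is, after folding l from any dict d
theorem pvGetA (l : List (Int × Option String)) (d : PySem.Dict Int (Int × Option String))
    (k : Int) :
    ((l.foldl pvStepA d).get? k).map (fun t => t.2) =
      match d.get? k with
      | some t => some (pvChooseFrom t.2 (pvValsOf k l))
      | none =>
        match pvValsOf k l with
        | [] => none
        | v :: vs => some (pvChooseFrom v vs) := by
  induction l generalizing d with
  | nil => cases hd : d.get? k <;> simp [pvValsOf, pvChooseFrom, hd]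
  | cons p l ih =>
    rw [List.foldl_cons, ih]
    by_cases hk : p.1 = k
    · subst hk
      cases hd : d.get? p.1 with
      | none =>
        have hc : d.contains p.1 = false := by
          rw [PySem.Dict.contains_eq_isSome_get?, hd]; rfl
        rw [pvStepA, if_pos hc, PySem.Dict.get?_insert_self]
        simp [pvValsOf_cons]
      | some t =>
        have hc : d.contains p.1 = true := by
          rw [PySem.Dict.contains_eq_isSome_get?, hd]; rfl
        rw [pvStepA, if_neg (by simp [hc])]
        cases hv : p.2 with
        | none =>
          rw [if_neg (by simp [hv]), hd]
          simp [pvValsOf_cons, pvChooseFrom, hv]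
        | some s =>
          rw [if_pos (by simp [hv]), PySem.Dict.get?_insert_self]
          simp [pvValsOf_cons, pvChooseFrom, hv]
    · have hstep : (pvStepA d p).get? k = d.get? k := by
        unfold pvStepA
        have hne : ¬k = p.1 := fun h => hk h.symm
        split_ifs <;> simp [PySem.Dict.get?_insert, hne]
      rw [hstep, pvValsOf_cons, if_neg hk]

-- ===== VERDICT (by name: the statement is the Claim_ definition above) =====
theorem filtering_to_unique_spec : Claim_equal_filtering_to_unique := by
  intro l _
  unfold Spec_filtering_to_unique
  simp only [filtering_to_unique, filtering_to_unique_alt]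
  -- shared key list
  have hkA := pvKeysA l PySem.Dict.empty
  have hkB := PySem.Dict.keys_foldl_modify_key l (fun p : Int × Option String => p.1) []
      (fun _ p => (· ++ [p.2])) PySem.Dict.empty
  rw [PySem.Dict.keys_empty] at hkA hkB
  have hndA : (l.foldl pvStepA PySem.Dict.empty).keys.Nodup := by
    rw [hkA, PySem.Set.update_nil_left]; exact PySem.Set.nodup_ofList _
  have hndB : ((l.foldl (fun d p => d.modify p.1 [] (· ++ [p.2])) PySem.Dict.empty)).keys.Nodup := by
    rw [hkB, PySem.Set.update_nil_left]; exact PySem.Set.nodup_ofList _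
  rw [PySem.Dict.values_eq_map_keys _ hndA ((0 : Int), (none : Option String)),
      PySem.Dict.values_eq_map_keys _ hndB ([] : List (Option String))]
  rw [List.map_map, List.map_map, hkA, hkB]
  apply List.map_congr_left
  intro k hkmem
  simp only [Function.comp_apply]
  -- B side value
  have hB : (l.foldl (fun d p => d.modify p.1 [] (· ++ [p.2])) PySem.Dict.empty).getD k [] =
      pvValsOf k l := by
    rw [PySem.Dict.getD_foldl_modify_append, PySem.Dict.getD_empty]
    rfl
  -- A side: k is a key, so get? is some
  have hkeyA : k ∈ (l.foldl pvStepA PySem.Dict.empty).keys := by rw [hkA]; exact hkmem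
  obtain ⟨t, ht⟩ : ∃ t, (l.foldl pvStepA PySem.Dict.empty).get? k = some t := by
    cases hg : (l.foldl pvStepA PySem.Dict.empty).get? k with
    | none => exact absurd ((PySem.Dict.get?_eq_none_iff_not_mem_keys _ _).mp hg) (by simp [hkeyA])
    | some t => exact ⟨t, rfl⟩
  have hA := pvGetA l PySem.Dict.empty k
  rw [ht, PySem.Dict.get?_empty] at hA
  rw [PySem.Dict.getD_eq_get?_getD, ht, hB]
  cases hv : pvValsOf k l with
  | nil => rw [hv] at hA; simp at hA
  | cons v vs =>
    rw [hv] at hA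
    simp only [Option.map_some, Option.some.injEq] at hA
    simp [hA, pvChooseLast_cons]
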